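-- pv_equiv track=rewrite | github.com/Adam-1776/Practice | DSA/reverseString/solution.py | reverseStr2
-- ===== SOURCE A (Python) =====
-- def reverseStr2(s: str, k: int) -> str:
--     def reverse(left: int, right: int, s: list): #Child function to reverse list from index left to right, both inclusive
--         if right >= len(s) : right = len(s) - 1 #Keep going till the end of the list, in case the right index is out of bounds
--         while (left < right):
--             s[left], s[right] = s[right], s[left]
--             left += 1
--             right -= 1
--
--
--     listChars = list(s) #Convert the string to a list as-is
--     for i in range(0, len(listChars), 2*k): #Iterate over indexes 0 to the end of the list, jumping 2*k in each iteration
--         reverse(i,i+k-1,listChars) #Reverse all characters from i to i+k-1. We subtract one because our reverse method works inclusively for both indexes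
--
--     return "".join(listChars) #Return this list after converting it back to a string.
-- ===== SOURCE B (Python) =====
-- def reverseStr2(s: str, k: int) -> str:
--     pieces = []
--     for i in range(0, len(s), 2 * k):
--         pieces.append(s[i:i+k][::-1] + s[i+k:i+2*k])
--     return "".join(pieces)
-- ===== Notes on version B (the rewrite author's own statement) =====
-- stated objective: idiomatic
-- what changed: Replaces the char-list plus in-place two-pointer swap helper (with explicit right-bound clamping) by chunked slicing: for each 2k-step start index emit the reversed first k-slice plus the untouched next k-slice and join the pieces.
-- outside the precondition, e.g. on reverseStr2('ab', -1): A returns 'ab', B returns ''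
import Mathlib
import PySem

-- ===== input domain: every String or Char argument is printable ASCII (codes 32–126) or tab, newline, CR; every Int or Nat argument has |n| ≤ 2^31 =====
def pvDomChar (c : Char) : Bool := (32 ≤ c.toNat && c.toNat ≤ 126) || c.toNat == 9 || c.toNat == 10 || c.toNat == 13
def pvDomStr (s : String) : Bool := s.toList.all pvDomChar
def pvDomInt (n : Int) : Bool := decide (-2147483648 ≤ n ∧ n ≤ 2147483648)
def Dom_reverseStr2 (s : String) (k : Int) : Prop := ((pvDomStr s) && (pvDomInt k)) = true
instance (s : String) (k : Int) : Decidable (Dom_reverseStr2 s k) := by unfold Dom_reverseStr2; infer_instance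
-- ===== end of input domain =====

-- B replaces A's char-list + in-place two-pointer-swap helper by chunked slice reversal joined piecewise (idiomatic, same cost).


-- ===== PORT A =====
-- s[left], s[right] = s[right], s[left]: both reads happen on the original list, then both writes.
-- The pyGetD/pySetD defaults are never exercised: every index this is called on is in range
-- (0 ≤ left < right ≤ len - 1 after the clamp in pvReverseA).
def pvSwapA (l : List Char) (i j : Int) : List Char :=
  PySem.List.pySetD (PySem.List.pySetD l i (PySem.List.pyGetD l j ' ')) j (PySem.List.pyGetD l i ' ')

-- the 'while (left < right)' loop of A's child function `reverse`
def pvRevLoopA (left right : Int) (l : List Char) : List Char :=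
  if left < right then pvRevLoopA (left + 1) (right - 1) (pvSwapA l left right) else l
termination_by (right - left).toNat
decreasing_by omega

-- A's child function `reverse`, with its clamp of the right index
def pvReverseA (left right : Int) (l : List Char) : List Char :=
  let right := if right ≥ (l.length : Int) then (l.length : Int) - 1 else right
  pvRevLoopA left right l

def reverseStr2 (s : String) (k : Int) : String :=
  let listChars := s.toList
  let res := (PySem.List.pyRange 0 (listChars.length : Int) (2 * k)).foldl
      (fun l i => pvReverseA i (i + k - 1) l) listChars
  String.mk res

-- ===== PORT B =====
-- s[i:i+k][::-1] is the reverse of the slice (PySem.List.slice?_none_none_neg_one); "".join flattens the pieces.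
def reverseStr2_alt (s : String) (k : Int) : String :=
  let cs := s.toList
  let pieces := (PySem.List.pyRange 0 (cs.length : Int) (2 * k)).foldl
      (fun acc i => acc ++ [(PySem.List.slice cs (some i) (some (i + k))).reverse ++
                            PySem.List.slice cs (some (i + k)) (some (i + 2 * k))]) []
  String.mk pieces.flatten

-- ===== PRECONDITION & SPEC =====
-- Pre_ restricts to the natural domain k ≥ 1: k = 0 makes both programs raise ValueError (zero range
-- step), and negative k is an unspecified degenerate corner where A's vacuous loop happens to return s
-- unchanged while B's vacuous chunking returns "" — both values are accidental and neither is specified.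
def Pre_reverseStr2 (s : String) (k : Int) : Prop := 1 ≤ k

instance (s : String) (k : Int) : Decidable (Pre_reverseStr2 s k) := by
  unfold Pre_reverseStr2; infer_instance

def pvWitness_reverseStr2 : String × Int := ("abcdefg", 2)

def Spec_reverseStr2 (s : String) (k : Int) (out : String) : Prop := out = reverseStr2_alt s k
instance (s : String) (k : Int) (out : String) : Decidable (Spec_reverseStr2 s k out) := by
  unfold Spec_reverseStr2; infer_instance

-- ===== CLAIM (what is proved, stated in full; the proofs are below) =====
def Claim_equal_reverseStr2 : Prop :=
  ∀ (s : String) (k : Int), Dom_reverseStr2 s k → Pre_reverseStr2 s k →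
    Spec_reverseStr2 s k (reverseStr2 s k)

-- ===== LEMMAS AND PROOFS =====

-- common specification both ports are reduced to: reverse the first k chars of every 2k-block
def chunkSpec (k : Nat) (l : List Char) : List Char :=
  if h : l = [] ∨ k = 0 then l
  else (l.take k).reverse ++ (l.drop k).take k ++ chunkSpec k (l.drop (2 * k))
termination_by l.length
decreasing_by
  simp only [not_or] at h
  have hl : 0 < l.length := List.length_pos_iff.mpr h.1
  simp only [List.length_drop]; omega

theorem chunkSpec_nil (k : Nat) : chunkSpec k [] = [] := by
  unfold chunkSpec; simp

theorem chunkSpec_cons (k : Nat) (hk : k ≠ 0) (l : List Char) (hl : l ≠ []) :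
    chunkSpec k l = (l.take k).reverse ++ (l.drop k).take k ++ chunkSpec k (l.drop (2 * k)) := by
  rw [chunkSpec]; simp [hl, hk]

-- positive-step pyRange: nil and cons forms
theorem pyRange_pos_nil (a b s : Int) (hs : 0 < s) (h : b ≤ a) :
    PySem.List.pyRange a b s = [] := by
  rw [PySem.List.pyRange_of_pos a b hs]
  simp [show ¬ a < b by omega]

theorem pyRange_pos_cons (a b s : Int) (hs : 0 < s) (h : a < b) :
    PySem.List.pyRange a b s = a :: PySem.List.pyRange (a + s) b s := by
  rw [PySem.List.pyRange_of_pos a b hs, PySem.List.pyRange_of_pos (a + s) b hs]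
  have key : ((b - a + s - 1) / s).toNat
      = (if a + s < b then ((b - (a + s) + s - 1) / s).toNat else 0) + 1 := by
    split
    · rename_i h2
      have e : b - a + s - 1 = (b - (a + s) + s - 1) + 1 * s := by ring
      rw [e, Int.add_mul_ediv_right _ _ (by omega)]
      have h0 : 0 ≤ (b - (a + s) + s - 1) / s := Int.ediv_nonneg (by omega) (by omega)
      omega
    · rename_i h2
      have h1 : (b - a + s - 1) / s = 1 := by
        rw [← PySem.Int.floordiv_eq_ediv_of_pos hs, PySem.Int.floordiv_eq_iff_of_pos hs]
        constructor <;> nlinarith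
      omega
  rw [key, if_pos h, List.range_succ_eq_map]
  simp only [List.map_cons, List.map_map]
  congr 1
  · omega
  · apply List.map_congr_left
    intro x _
    simp [Nat.succ_eq_add_one]
    ring

-- list getD / set at the junction of an append
theorem getD_append_mid (p r : List Char) (a d : Char) :
    (p ++ a :: r).getD p.length d = a := by
  simp [List.getD]

theorem set_append_mid (p r : List Char) (a v : Char) :
    (p ++ a :: r).set p.length v = p ++ v :: r := by
  rw [List.set_append]
  simp

-- one iteration of the while loop swaps the two ends of the middle segment
theorem swap_mid (p mid q : List Char) (a b : Char) :
    pvSwapA (p ++ a :: mid ++ b :: q) (p.length : Int) ((p ++ a :: mid).length : Int)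
      = p ++ b :: mid ++ a :: q := by
  unfold pvSwapA
  have h1 : PySem.List.pyGetD (p ++ a :: mid ++ b :: q) ((p ++ a :: mid).length : Int) ' ' = b := by
    rw [PySem.List.pyGetD_natCast]
    have : p ++ a :: mid ++ b :: q = (p ++ a :: mid) ++ b :: q := by simp
    rw [this, getD_append_mid]
  have h2 : PySem.List.pyGetD (p ++ a :: mid ++ b :: q) ((p.length : Nat) : Int) ' ' = a := by
    rw [PySem.List.pyGetD_natCast]
    have : p ++ a :: mid ++ b :: q = p ++ a :: (mid ++ b :: q) := by simp
    rw [this, getD_append_mid]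
  rw [h1, h2]
  simp only [PySem.List.pySetD_natCast]
  have e1 : p ++ a :: mid ++ b :: q = p ++ a :: (mid ++ b :: q) := by simp
  rw [e1, set_append_mid]
  have e2 : p ++ b :: (mid ++ b :: q) = (p ++ b :: mid) ++ b :: q := by simp
  have e3 : (p ++ a :: mid).length = (p ++ b :: mid).length := by simp
  rw [e3, e2, set_append_mid]

-- the two-pointer while loop reverses exactly the segment m sitting between p and q
theorem revLoop_seg (n : Nat) : ∀ (m p q : List Char), m.length = n →
    pvRevLoopA (p.length : Int) ((p.length : Int) + (m.length : Int) - 1) (p ++ m ++ q)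
      = p ++ m.reverse ++ q := by
  induction n using Nat.strong_induction_on with
  | _ n ih =>
    intro m p q hm
    rcases m with _ | ⟨a, rest⟩
    · rw [pvRevLoopA]
      simp
    · rcases rest.eq_nil_or_concat with hnil | ⟨mid, b, hcat⟩
      · subst hnil
        rw [pvRevLoopA]
        simp
      · subst hcat
        simp only [List.concat_eq_append] at hm ⊢
        rw [pvRevLoopA, if_pos (by simp; omega)]
        have hR : ((p.length : Int) + ((a :: (mid ++ [b])).length : Int) - 1)
            = ((p ++ a :: mid).length : Int) := by simp; omega
        have hl : p ++ (a :: (mid ++ [b])) ++ q = p ++ a :: mid ++ b :: q := by simp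
        rw [hR, hl, swap_mid]
        have hl2 : p ++ b :: mid ++ a :: q = (p ++ [b]) ++ mid ++ (a :: q) := by simp
        have hL : (p.length : Int) + 1 = (((p ++ [b]).length : Nat) : Int) := by simp
        have hR2 : ((p ++ a :: mid).length : Int) - 1
            = (((p ++ [b]).length : Nat) : Int) + ((mid.length : Nat) : Int) - 1 := by
          simp
          omega
        rw [hl2, hL, hR2, ih mid.length (by simp at hm ⊢; omega) mid (p ++ [b]) (a :: q) rfl]
        simp

-- A's `reverse i (i+k-1)` on p ++ l' reverses the first k chars of l' (clamp included)
theorem reverseA_seg (k : Int) (hk : 1 ≤ k) (p l' : List Char) :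
    pvReverseA (p.length : Int) ((p.length : Int) + k - 1) (p ++ l')
      = p ++ (l'.take k.toNat).reverse ++ l'.drop k.toNat := by
  unfold pvReverseA
  simp only [List.length_append, Nat.cast_add]
  by_cases hcl : (p.length : Int) + k - 1 ≥ (p.length : Int) + (l'.length : Int)
  · rw [if_pos hcl]
    have hbig : l'.length ≤ k.toNat := by omega
    have e : (p.length : Int) + (l'.length : Int) - 1
        = (p.length : Int) + ((l'.length : Nat) : Int) - 1 := by norm_num
    have := revLoop_seg l'.length l' p [] rfl
    simp only [List.append_nil] at this
    rw [e, this]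
    simp [List.take_of_length_le hbig, List.drop_of_length_le hbig]
  · rw [if_neg hcl]
    have hle : k.toNat ≤ l'.length := by omega
    have hsplit : p ++ l' = p ++ l'.take k.toNat ++ l'.drop k.toNat := by simp
    have hR : (p.length : Int) + k - 1
        = (p.length : Int) + (((l'.take k.toNat).length : Nat) : Int) - 1 := by
      simp [List.length_take, Nat.min_eq_left hle]; omega
    rw [hsplit, hR, revLoop_seg (l'.take k.toNat).length (l'.take k.toNat) p (l'.drop k.toNat) rfl]

-- A's fold over the 2k-range equals chunkSpec
theorem foldA (k : Nat) (hk : 1 ≤ k) : ∀ (n : Nat) (l' p : List Char), l'.length = n →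
    (PySem.List.pyRange (p.length : Int) ((p.length : Int) + (l'.length : Int)) (2 * (k : Int))).foldl
        (fun l i => pvReverseA i (i + (k : Int) - 1) l) (p ++ l')
      = p ++ chunkSpec k l' := by
  intro n
  induction n using Nat.strong_induction_on with
  | _ n ih =>
    intro l' p hn
    rcases eq_or_ne l' [] with hnil | hne
    · subst hnil
      rw [pyRange_pos_nil _ _ _ (by omega) (by simp)]
      simp [chunkSpec_nil]
    · have hpos : 0 < l'.length := List.length_pos_iff.mpr hne
      rw [pyRange_pos_cons _ _ _ (by omega) (by omega), List.foldl_cons,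
          reverseA_seg (k : Int) (by exact_mod_cast hk) p l']
      simp only [Int.toNat_natCast]
      have hregroup : p ++ (l'.take k).reverse ++ l'.drop k
          = (p ++ (l'.take k).reverse ++ (l'.drop k).take k) ++ l'.drop (2 * k) := by
        have : (l'.drop k).drop k = l'.drop (2 * k) := by
          rw [List.drop_drop]; ring_nf
        rw [← this]; simp
      set p' := p ++ (l'.take k).reverse ++ (l'.drop k).take k with hp'
      have hlenp' : (p'.length : Int)
          = (p.length : Int) + (min k l'.length : Nat) + (min k (l'.length - k) : Nat) := by
        simp [hp', List.length_take, List.length_drop]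
        ring
      by_cases hbig : 2 * k ≤ l'.length
      · have hstart : (p.length : Int) + 2 * (k : Int) = (p'.length : Int) := by
          rw [hlenp']
          have h1 : min k l'.length = k := Nat.min_eq_left (by omega)
          have h2 : min k (l'.length - k) = k := Nat.min_eq_left (by omega)
          rw [h1, h2]; omega
        have hstop : (p.length : Int) + (l'.length : Int)
            = (p'.length : Int) + ((l'.drop (2 * k)).length : Int) := by
          rw [← hstart]; simp [List.length_drop]; omega
        rw [hregroup, hstart, hstop,
            ih (l'.drop (2 * k)).length (by simp [List.length_drop]; omega) (l'.drop (2 * k)) p' rfl,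
            chunkSpec_cons k (by omega) l' hne]
        simp [hp']
      · have hdrop : l'.drop (2 * k) = [] := by rw [List.drop_eq_nil_iff]; omega
        have hempty : PySem.List.pyRange ((p.length : Int) + 2 * (k : Int))
            ((p.length : Int) + (l'.length : Int)) (2 * (k : Int)) = [] := by
          apply pyRange_pos_nil _ _ _ (by omega); omega
        rw [hempty, List.foldl_nil, chunkSpec_cons k (by omega) l' hne, hdrop, chunkSpec_nil]
        simp only [List.append_assoc, List.append_nil]
        have htk : List.take k (List.drop k l') = List.drop k l' :=
          List.take_of_length_le (by simp only [List.length_drop]; omega)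
        rw [htk]

-- B's pieces over the 2k-range flatten to chunkSpec
theorem mapB (k : Nat) (hk : 1 ≤ k) : ∀ (n : Nat) (cs : List Char) (j : Nat),
    (cs.drop j).length = n →
    (((PySem.List.pyRange (j : Int) (cs.length : Int) (2 * (k : Int))).map
        (fun i => (PySem.List.slice cs (some i) (some (i + (k : Int)))).reverse ++
                  PySem.List.slice cs (some (i + (k : Int))) (some (i + 2 * (k : Int))))).flatten)
      = chunkSpec k (cs.drop j) := by
  intro n
  induction n using Nat.strong_induction_on with
  | _ n ih =>
    intro cs j hn
    by_cases hj : cs.length ≤ j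
    · rw [pyRange_pos_nil _ _ _ (by omega) (by exact_mod_cast hj)]
      rw [List.drop_eq_nil_iff.mpr hj]
      simp [chunkSpec_nil]
    · push_neg at hj
      rw [pyRange_pos_cons _ _ _ (by omega) (by exact_mod_cast hj), List.map_cons, List.flatten_cons]
      have hs1 : PySem.List.slice cs (some ((j : Nat) : Int)) (some (((j : Nat) : Int) + (k : Int)))
          = (cs.drop j).take k := PySem.List.slice_natCast_add cs j k
      have ecast : ((j : Nat) : Int) + (k : Int) = (((j + k : Nat) : Nat) : Int) := by push_cast; ring
      have ecast2 : ((j : Nat) : Int) + 2 * (k : Int)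
          = (((j + k : Nat) : Nat) : Int) + ((k : Nat) : Int) := by push_cast; ring
      have hs2 : PySem.List.slice cs (some (((j : Nat) : Int) + (k : Int)))
            (some (((j : Nat) : Int) + 2 * (k : Int)))
          = ((cs.drop j).drop k).take k := by
        rw [ecast, ecast2, PySem.List.slice_natCast_add cs (j + k) k, List.drop_drop]
      have ecast3 : ((j : Nat) : Int) + 2 * (k : Int) = (((j + 2 * k : Nat) : Nat) : Int) := by
        push_cast; ring
      have hrest : (cs.drop (j + 2 * k)).length < n := by
        simp only [List.length_drop] at hn ⊢; omega
      rw [hs1, hs2, ecast3, ih _ hrest cs (j + 2 * k) rfl,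
          chunkSpec_cons k (by omega) (cs.drop j) (by
            intro hc; rw [List.drop_eq_nil_iff] at hc; omega)]
      have : (cs.drop j).drop (2 * k) = cs.drop (j + 2 * k) := by rw [List.drop_drop]
      rw [this]

-- each port, reduced to chunkSpec
theorem A_eq (k : Int) (hk : 1 ≤ k) (cs : List Char) :
    (PySem.List.pyRange 0 (cs.length : Int) (2 * k)).foldl
        (fun l i => pvReverseA i (i + k - 1) l) cs = chunkSpec k.toNat cs := by
  have h := foldA k.toNat (by omega) cs.length cs [] rfl
  rw [Int.toNat_of_nonneg (by omega : (0 : Int) ≤ k)] at h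
  simpa using h

theorem B_eq (k : Int) (hk : 1 ≤ k) (cs : List Char) :
    ((PySem.List.pyRange 0 (cs.length : Int) (2 * k)).foldl
        (fun acc i => acc ++ [(PySem.List.slice cs (some i) (some (i + k))).reverse ++
                              PySem.List.slice cs (some (i + k)) (some (i + 2 * k))]) []).flatten
      = chunkSpec k.toNat cs := by
  rw [PySem.List.foldl_append_singleton_eq_map]
  have h := mapB k.toNat (by omega) (cs.drop 0).length cs 0 rfl
  rw [Int.toNat_of_nonneg (by omega : (0 : Int) ≤ k)] at h
  simpa using h

-- ===== VERDICT (by name: the statement is the Claim_ definition above) =====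
theorem reverseStr2_spec : Claim_equal_reverseStr2 := by
  intro s k _ hk
  simp only [Spec_reverseStr2, reverseStr2, reverseStr2_alt]
  rw [A_eq k hk, B_eq k hk]
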